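-- pv_equiv track=rewrite | github.com/pdewar/Python | RLE/Find-run-from-index.py | find_run_gen
-- ===== SOURCE A (Python) =====
-- def find_run_gen(S, i):
--     m = 0
--     p = 0
--     if len(S[i:-1]) == 0:
--         p = p+1
--         return p
--     while m < len(S[i:-1])+1:
--         if S[i] == S[i+m]:
--             p = p+1
--         else:
--             p = p
--         m = m+1
--     return p
-- ===== SOURCE B (Python) =====
-- def find_run_gen(S, i):
--     # Count-difference formulation: occurrences of S[i] in the whole string
--     # minus occurrences in the prefix before i; no loop over the suffix.
--     if not S[i:-1]:
--         return 1
--     c = S[i]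
--     return S.count(c) - S[:i].count(c)
-- ===== Notes on version B (the rewrite author's own statement) =====
-- stated objective: faster
-- what changed: Replaced the while loop that re-slices S[i:-1] on every iteration and compares the suffix element by element with a count-difference formulation: occurrences of S[i] in the whole string minus occurrences in the prefix S[:i], with no loop over the suffix.
import Mathlib
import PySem

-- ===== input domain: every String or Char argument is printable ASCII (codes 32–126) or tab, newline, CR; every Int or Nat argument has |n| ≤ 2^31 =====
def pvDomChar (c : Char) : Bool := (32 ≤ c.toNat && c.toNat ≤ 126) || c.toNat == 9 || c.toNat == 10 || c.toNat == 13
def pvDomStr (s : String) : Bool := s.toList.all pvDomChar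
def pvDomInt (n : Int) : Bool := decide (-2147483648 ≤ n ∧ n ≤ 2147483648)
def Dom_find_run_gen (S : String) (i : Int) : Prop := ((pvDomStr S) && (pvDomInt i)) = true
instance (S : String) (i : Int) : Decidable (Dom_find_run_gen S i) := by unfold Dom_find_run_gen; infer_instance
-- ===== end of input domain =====

-- ===== PORT A =====
-- A: counts characters equal to S[i] over positions i..i+len(S[i:-1]) with a while
-- loop whose bound re-evaluates the slice S[i:-1]; returns 1 early when that slice is empty.
def find_run_gen (S : String) (i : Int) : Int :=
  if (PySem.List.slice S.toList (some i) (some (-1))).length = 0 then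
    0 + 1
  else
    (PySem.List.pyRange 0 (((PySem.List.slice S.toList (some i) (some (-1))).length : Int) + 1) 1).foldl
      (fun p m =>
        match PySem.List.pyGet? S.toList i, PySem.List.pyGet? S.toList (i + m) with
        | some a, some b => if a == b then p + 1 else p
        | _, _ => p) 0

-- ===== PORT B =====
-- B: keeps A's explicit empty-slice guard, then count difference: occurrences of
-- S[i] in the whole string minus occurrences in the prefix S[:i]; no loop over the suffix.
def find_run_gen_alt (S : String) (i : Int) : Int :=
  if PySem.List.slice S.toList (some i) (some (-1)) = [] then 1
  else
    match PySem.List.pyGet? S.toList i with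
    | none => 0  -- Python raises IndexError here; excluded by Pre_
    | some c =>
        ((S.toList.count c : Int)) - ((PySem.List.slice S.toList none (some i)).count c : Int)

-- ===== PRECONDITION & SPEC =====
-- A raises IndexError exactly when len(S) >= 2 and i < -len(S) (then S[i:-1] is
-- non-empty and S[i] is out of range); Pre_ excludes exactly those inputs.
def Pre_find_run_gen (S : String) (i : Int) : Prop :=
  -(S.toList.length : Int) ≤ i ∨ S.toList.length ≤ 1
instance (S : String) (i : Int) : Decidable (Pre_find_run_gen S i) := by
  unfold Pre_find_run_gen; infer_instance
def pvWitness_find_run_gen : String × Int := ("aab", 0)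
def Spec_find_run_gen (S : String) (i : Int) (out : Int) : Prop := out = find_run_gen_alt S i
instance (S : String) (i : Int) (out : Int) : Decidable (Spec_find_run_gen S i out) := by unfold Spec_find_run_gen; infer_instance

-- ===== CLAIM (what is proved, stated in full; the proofs are below) =====
def Claim_equal_find_run_gen : Prop := ∀ (S : String) (i : Int), Dom_find_run_gen S i → Pre_find_run_gen S i → Spec_find_run_gen S i (find_run_gen S i)

-- ===== LEMMAS AND PROOFS =====

lemma clampIdx_char (n : Nat) (x : Int) :
    ((PySem.List.clampIdx n x : Nat) : Int)
      = if x < 0 then (if (n : Int) + x < 0 then 0 else (n : Int) + x) else min x n := by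
  simp only [PySem.List.clampIdx]
  split_ifs <;> omega

lemma pyGet?_clamp (cs : List Char) (i : Int)
    (h1 : -(cs.length : Int) ≤ i) (h2 : i < cs.length) :
    PySem.List.pyGet? cs i = cs[PySem.List.clampIdx cs.length i]? := by
  by_cases hi : 0 ≤ i
  · have hcl : PySem.List.clampIdx cs.length i = i.toNat := by
      simp only [PySem.List.clampIdx]; split_ifs <;> omega
    rw [hcl]
    simp [PySem.List.pyGet?, PySem.List.pyIdx?, hi, h2]
  · have hcl : PySem.List.clampIdx cs.length i = cs.length - (-i).toNat := by
      simp only [PySem.List.clampIdx]; split_ifs <;> omega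
    simp [PySem.List.pyGet?, PySem.List.pyIdx?, hi, h1, hcl]

lemma pyGet?_clamp_shift (cs : List Char) (i : Int) (m : Nat)
    (h1 : -(cs.length : Int) ≤ i) (h2 : i < cs.length)
    (hm : PySem.List.clampIdx cs.length i + m < cs.length) :
    PySem.List.pyGet? cs (i + m) = cs[PySem.List.clampIdx cs.length i + m]? := by
  have hcl := clampIdx_char cs.length i
  have hmI : ((PySem.List.clampIdx cs.length i : Nat) : Int) + m < cs.length := by
    exact_mod_cast hm
  have h3 : -(cs.length : Int) ≤ i + m := by omega
  have h4 : i + m < cs.length := by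
    split_ifs at hcl <;> omega
  rw [pyGet?_clamp cs (i + m) h3 h4]
  congr 1
  have hcl2 := clampIdx_char cs.length (i + m)
  split_ifs at hcl hcl2 <;> omega

lemma foldA_count (cs : List Char) (i : Int) (c : Char)
    (hc : PySem.List.pyGet? cs i = some c)
    (hidx : ∀ m : Nat, PySem.List.clampIdx cs.length i + m < cs.length →
      PySem.List.pyGet? cs (i + m) = cs[PySem.List.clampIdx cs.length i + m]?) :
    ∀ (t : Nat), PySem.List.clampIdx cs.length i + t ≤ cs.length → ∀ (p : Int),
      (List.range t).foldl
        (fun (p : Int) (k : Nat) =>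
          match PySem.List.pyGet? cs i, PySem.List.pyGet? cs (i + (0 + (k : Int))) with
          | some a, some b => if a == b then p + 1 else p
          | _, _ => p) p
      = p + (((cs.drop (PySem.List.clampIdx cs.length i)).take t).count c : Int) := by
  intro t
  set j := PySem.List.clampIdx cs.length i with hj
  induction t with
  | zero => intro _ p; simp
  | succ t ih =>
    intro ht p
    have hjt : j + t < cs.length := by omega
    rw [List.range_succ, List.foldl_append, ih (by omega)]
    have hg : PySem.List.pyGet? cs (i + (0 + (t : Int))) = cs[j + t]? := by
      rw [zero_add]; exact hidx t hjt
    have hget : cs[j + t]? = some cs[j + t] := List.getElem?_eq_getElem hjt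
    have hd : (cs.drop j)[t]? = cs[j + t]? := List.getElem?_drop ..
    have htake : (cs.drop j).take (t + 1) = (cs.drop j).take t ++ [cs[j + t]] := by
      rw [List.take_add_one, hd, hget]; rfl
    rw [htake, List.count_append]
    simp only [List.foldl_cons, List.foldl_nil, hc, hg, hget]
    by_cases hcc : c = cs[j + t]
    · simp [hcc]; ring
    · have hb1 : (c == cs[j + t]) = false := by simpa using hcc
      have hb2 : (cs[j + t] == c) = false := by simpa using (Ne.symm hcc)
      simp [hb1, hb2, List.count_singleton]

lemma count_split (cs : List Char) (j : Nat) (c : Char) :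
    ((cs.drop j).count c : Int) = (cs.count c : Int) - ((cs.take j).count c : Int) := by
  have h : cs.count c = (cs.take j).count c + (cs.drop j).count c := by
    conv_lhs => rw [← List.take_append_drop j cs]
    exact List.count_append ..
  omega

-- ===== VERDICT (by name: the statement is the Claim_ definition above) =====
theorem find_run_gen_spec : Claim_equal_find_run_gen := by
  intro S i _ hpre
  unfold Pre_find_run_gen at hpre
  unfold Spec_find_run_gen find_run_gen find_run_gen_alt
  set cs := S.toList with hcs
  by_cases hsl : PySem.List.slice cs (some i) (some (-1)) = []
  · simp [hsl]
  · have hlen : ¬ ((PySem.List.slice cs (some i) (some (-1))).length = 0) := by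
      simpa [List.length_eq_zero_iff] using hsl
    have hchar := clampIdx_char cs.length i
    have hsl' : PySem.List.slice cs (some i) (some (-1))
        = (cs.drop (PySem.List.clampIdx cs.length i)).take
            ((cs.length - 1) - PySem.List.clampIdx cs.length i) := by
      simp [PySem.List.slice]
    set j := PySem.List.clampIdx cs.length i with hjdef
    have hlen2 : (PySem.List.slice cs (some i) (some (-1))).length = (cs.length - 1) - j := by
      rw [hsl']; simp [List.length_take, List.length_drop]; omega
    have hjn : j < cs.length - 1 := by
      rw [hlen2] at hlen; omega
    have hn2 : 2 ≤ cs.length := by omega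
    have h1 : -(cs.length : Int) ≤ i := by
      rcases hpre with h | h
      · exact h
      · omega
    have h2 : i < cs.length := by
      split_ifs at hchar <;> omega
    have hjlt : j < cs.length := by omega
    have hc : PySem.List.pyGet? cs i = some cs[j] := by
      rw [pyGet?_clamp cs i h1 h2, ← hjdef]
      exact List.getElem?_eq_getElem hjlt
    have hcnt : ((((cs.length - 1) - j : Nat) : Int) + 1 - 0).toNat = cs.length - j := by
      omega
    rw [if_neg hlen, if_neg hsl, hlen2, PySem.List.pyRange_one, List.foldl_map, hcnt]
    rw [foldA_count cs i cs[j] hc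
      (fun m hm => pyGet?_clamp_shift cs i m h1 h2 hm) (cs.length - j) (by omega) 0]
    have hfull : (cs.drop j).take (cs.length - j) = cs.drop j := by
      apply List.take_of_length_le; simp
    have hpref : PySem.List.slice cs none (some i) = cs.take j := by
      simp [PySem.List.slice, ← hjdef]
    rw [hc, hfull, hpref]
    rw [count_split cs j cs[j]]
    ring
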